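-- pv_equiv track=rewrite | github.com/suyog12/captsone | scripts/analysis/compute_private_brand_equivalents.py | extract_product_type
-- ===== SOURCE A (Python) =====
-- def extract_product_type(desc: str) -> str:
--     # Product type is typically the first word before the first comma.
--     # For compound drug names like "HYDROCORTISONE+ALOE", we keep just the
--     # base drug before the first '+' or '-' so it matches plain "HYDROCORTISONE".
--     if not isinstance(desc, str) or not desc.strip():
--         return ""
--     first_part = desc.split(",")[0].strip().upper()
--     first_word = first_part.split()[0] if first_part else ""
--     # Strip compound indicators so HYDROCORTISONE+ALOE matches HYDROCORTISONE
--     for sep in ["+", "/"]: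
--         if sep in first_word:
--             first_word = first_word.split(sep)[0]
--     return first_word
-- ===== SOURCE B (Python) =====
-- def extract_product_type(desc: str) -> str:
--     # Single left-to-right scan: skip leading whitespace, then collect the
--     # uppercased run of characters up to the first comma/plus/slash/whitespace.
--     if not isinstance(desc, str):
--         return ""
--     n = len(desc)
--     i = 0
--     while i < n and desc[i].isspace():
--         i += 1
--     out = []
--     while i < n and desc[i] not in ",+/" and not desc[i].isspace():
--         out.append(desc[i].upper())
--         i += 1
--     return "".join(out)
-- ===== Notes on version B (the rewrite author's own statement) =====
-- stated objective: simpler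
-- what changed: Replaces A's comma-split / strip / upper / whitespace-split / separator-loop chain (which builds several intermediate strings and lists) by a single left-to-right character scan that skips leading whitespace and collects the uppercased run of characters up to the first comma, plus, slash or whitespace.
import Mathlib
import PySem

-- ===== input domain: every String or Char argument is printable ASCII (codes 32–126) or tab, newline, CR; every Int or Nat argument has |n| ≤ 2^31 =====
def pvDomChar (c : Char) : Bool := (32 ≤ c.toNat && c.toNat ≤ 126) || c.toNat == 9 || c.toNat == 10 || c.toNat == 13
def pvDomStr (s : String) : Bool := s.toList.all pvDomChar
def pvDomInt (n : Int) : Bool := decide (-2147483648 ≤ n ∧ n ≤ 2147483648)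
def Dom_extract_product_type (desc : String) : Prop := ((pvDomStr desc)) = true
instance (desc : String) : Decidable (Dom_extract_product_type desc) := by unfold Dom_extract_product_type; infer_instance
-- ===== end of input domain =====

-- B replaces A's comma-split / strip / upper / word-split / separator-loop chain by one
-- left-to-right character scan (simpler, one pass); return values agree on all strings.

-- ===== PORT A =====
-- A: if not isinstance(desc, str) is vacuous for a String argument;
--    desc.split(",")[0] always exists (split is never empty) — ported as .headD [];
--    first_part.split()[0] is only taken when first_part is truthy, where it exists — ported as .headD [].
def extract_product_type (desc : String) : String :=
  if PySem.Chars.strip desc.toList = [] then ""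
  else
    let firstPart := PySem.Chars.upper (PySem.Chars.strip ((PySem.Chars.splitOn desc.toList [',']).headD []))
    let firstWord := if firstPart.isEmpty then [] else (PySem.Chars.split₀ firstPart).headD []
    let firstWord := [['+'], ['/']].foldl
      (fun w sep => if PySem.Chars.isIn sep w then (PySem.Chars.splitOn w sep).headD [] else w)
      firstWord
    String.ofList firstWord

-- ===== PORT B =====
-- while i < n and desc[i].isspace(): i += 1
def pvSkipWs : List Char → List Char
  | [] => []
  | c :: cs => if PySem.Chars.isspace c then pvSkipWs cs else c :: cs

-- while i < n and desc[i] not in ",+/" and not desc[i].isspace(): out.append(desc[i].upper())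
def pvTakeWord : List Char → List Char
  | [] => []
  | c :: cs =>
    if c == ',' || c == '+' || c == '/' || PySem.Chars.isspace c then []
    else PySem.Chars.upperChar c :: pvTakeWord cs

def extract_product_type_alt (desc : String) : String :=
  String.ofList (pvTakeWord (pvSkipWs desc.toList))

-- ===== PRECONDITION & SPEC =====
def Spec_extract_product_type (desc : String) (out : String) : Prop := out = extract_product_type_alt desc
instance (desc : String) (out : String) : Decidable (Spec_extract_product_type desc out) := by unfold Spec_extract_product_type; infer_instance

-- ===== CLAIM (what is proved, stated in full; the proofs are below) =====
def Claim_equal_extract_product_type : Prop := ∀ (desc : String), Dom_extract_product_type desc → Spec_extract_product_type desc (extract_product_type desc)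

-- ===== LEMMAS AND PROOFS =====

-- Char facts: upperChar maps [97,122] to [65,90] and fixes everything else
theorem pv_toNat_of_le {c d : Char} (h : c ≤ d) : c.toNat ≤ d.toNat := h

theorem pv_upperChar_toNat (c : Char) (h : PySem.Chars.islower c = true) :
    (PySem.Chars.upperChar c).toNat = c.toNat - 32 := by
  simp [PySem.Chars.islower] at h
  have h1 : 97 ≤ c.toNat := pv_toNat_of_le h.1
  have h2 : c.toNat ≤ 122 := pv_toNat_of_le h.2
  simp [PySem.Chars.upperChar, PySem.Chars.islower, h.1, h.2, Char.toNat_ofNat]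
  omega

theorem pv_isspace_upperChar (c : Char) :
    PySem.Chars.isspace (PySem.Chars.upperChar c) = PySem.Chars.isspace c := by
  by_cases h : PySem.Chars.islower c = true
  · have ht := pv_upperChar_toNat c h
    simp [PySem.Chars.islower] at h
    have h1 : 97 ≤ c.toNat := pv_toNat_of_le h.1
    have h2 : c.toNat ≤ 122 := pv_toNat_of_le h.2
    simp only [PySem.Chars.isspace, ht]
    rw [Bool.eq_iff_iff]
    simp only [Bool.or_eq_true, Bool.and_eq_true, decide_eq_true_eq]
    omega
  · simp [PySem.Chars.upperChar, h]

theorem pv_beq_upperChar (c a : Char) (h97 : a.toNat < 65) :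
    (PySem.Chars.upperChar c == a) = (c == a) := by
  by_cases h : PySem.Chars.islower c = true
  · have ht := pv_upperChar_toNat c h
    simp [PySem.Chars.islower] at h
    have h1 : 97 ≤ c.toNat := pv_toNat_of_le h.1
    have h2 : c.toNat ≤ 122 := pv_toNat_of_le h.2
    rw [Bool.eq_iff_iff]
    simp only [beq_iff_eq]
    constructor <;> intro he
    · have h3 := congrArg Char.toNat he; rw [ht] at h3; omega
    · have h3 := congrArg Char.toNat he; omega
  · simp [PySem.Chars.upperChar, h]

-- B-side characterisation
theorem pvSkipWs_eq (l : List Char) : pvSkipWs l = l.dropWhile PySem.Chars.isspace := by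
  induction l with
  | nil => rfl
  | cons c cs ih => by_cases h : PySem.Chars.isspace c <;> simp [pvSkipWs, List.dropWhile, h, ih]

def pvNS (c : Char) : Bool := !(c == ',' || c == '+' || c == '/' || PySem.Chars.isspace c)

theorem pvTakeWord_eq (l : List Char) :
    pvTakeWord l = (l.takeWhile pvNS).map PySem.Chars.upperChar := by
  induction l with
  | nil => rfl
  | cons c cs ih =>
    by_cases h : (c == ',' || c == '+' || c == '/' || PySem.Chars.isspace c) = true
    · simp [pvTakeWord, h, List.takeWhile, pvNS]
    · simp only [Bool.not_eq_true] at h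
      simp [pvTakeWord, h, List.takeWhile, pvNS, ih]

-- A-side: head of splitOn with a single-character separator is takeWhile (· != a)
theorem pv_splitOn_go_shape (sep : List Char) (fuel : Nat) :
    ∀ l cur acc, ∃ r, PySem.Chars.splitOn.go sep fuel l cur acc = (r ++ acc).reverse := by
  induction fuel with
  | zero =>
    refine fun l cur acc => ⟨[cur.reverse ++ l], ?_⟩
    rw [PySem.Chars.splitOn.go]
    rfl
  | succ n ih =>
    intro l cur acc
    cases l with
    | nil =>
      refine ⟨[cur.reverse], ?_⟩
      rw [PySem.Chars.splitOn.go]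
      · rfl
      · omega
    | cons c rest =>
      rw [PySem.Chars.splitOn.go]
      by_cases h : sep.isPrefixOf (c :: rest) = true
      · simp only [h, if_true]
        obtain ⟨r, hr⟩ := ih ((c :: rest).drop sep.length) [] (cur.reverse :: acc)
        exact ⟨r ++ [cur.reverse], by simp [hr]⟩
      · simp only [h]
        exact ih rest (c :: cur) acc

theorem pv_splitOn_go_head_acc (sep : List Char) (fuel : Nat) (l cur : List Char)
    (acc : List (List Char)) (a : List Char) :
    (PySem.Chars.splitOn.go sep fuel l cur (acc ++ [a])).head? = some a := by
  obtain ⟨r, hr⟩ := pv_splitOn_go_shape sep fuel l cur (acc ++ [a])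
  simp [hr]

theorem pv_splitOn_go_head (a : Char) (fuel : Nat) :
    ∀ l cur : List Char, l.length ≤ fuel →
      (PySem.Chars.splitOn.go [a] fuel l cur []).head? =
        some (cur.reverse ++ l.takeWhile (fun x => x != a)) := by
  induction fuel with
  | zero =>
    intro l cur h
    have : l = [] := List.length_eq_zero_iff.mp (Nat.le_zero.mp h)
    subst this
    rw [PySem.Chars.splitOn.go]; simp
  | succ n ih =>
    intro l cur h
    cases l with
    | nil =>
      rw [PySem.Chars.splitOn.go]
      · simp
      · omega
    | cons c rest =>
      rw [PySem.Chars.splitOn.go]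
      by_cases hc : c = a
      · subst hc
        have hp : List.isPrefixOf [c] (c :: rest) = true := by simp [List.isPrefixOf]
        simp only [hp, if_true, List.length_cons, List.length_nil]
        have hh := pv_splitOn_go_head_acc [c] n ((c :: rest).drop 1) [] [] cur.reverse
        simp only [List.nil_append] at hh
        simp only [List.drop] at hh ⊢
        rw [hh]
        simp [List.takeWhile]
      · have hp : List.isPrefixOf [a] (c :: rest) = false := by
          simp [List.isPrefixOf]; exact fun he => absurd he.symm hc
        simp only [hp, Bool.false_eq_true, if_false]
        rw [ih rest (c :: cur) (by simpa using Nat.le_of_succ_le_succ h)]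
        have hbne : (c != a) = true := by simp [hc]
        simp [List.takeWhile, hbne]

theorem pv_splitOn_head (a : Char) (l : List Char) :
    (PySem.Chars.splitOn l [a]).headD [] = l.takeWhile (fun x => x != a) := by
  unfold PySem.Chars.splitOn
  rw [List.headD_eq_head?_getD, pv_splitOn_go_head a (l.length + 1) l [] (Nat.le_succ _)]
  rfl

-- A-side: head of whitespace split is the first word
theorem pv_split₀_go_shape :
    ∀ l cur : List Char, ∀ acc, ∃ r, PySem.Chars.split₀.go l cur acc = (r ++ acc).reverse := by
  intro l
  induction l with
  | nil =>
    intro cur acc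
    rw [PySem.Chars.split₀.go]
    by_cases h : cur.isEmpty
    · exact ⟨[], by simp [h]⟩
    · exact ⟨[cur.reverse], by simp [h]⟩
  | cons c rest ih =>
    intro cur acc
    rw [PySem.Chars.split₀.go]
    by_cases h : PySem.Chars.isspace c
    · simp only [h, if_true]
      by_cases hc : cur.isEmpty
      · simp only [hc, if_true]; exact ih [] acc
      · simp only [hc, Bool.false_eq_true, if_false]
        obtain ⟨r, hr⟩ := ih [] (cur.reverse :: acc)
        exact ⟨r ++ [cur.reverse], by simp [hr]⟩
    · simp only [h, Bool.false_eq_true, if_false]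
      exact ih (c :: cur) acc

theorem pv_split₀_go_head_acc (l cur : List Char) (acc : List (List Char)) (a : List Char) :
    (PySem.Chars.split₀.go l cur (acc ++ [a])).head? = some a := by
  obtain ⟨r, hr⟩ := pv_split₀_go_shape l cur (acc ++ [a])
  simp [hr]

theorem pv_split₀_go_head_mid :
    ∀ l cur : List Char, cur ≠ [] →
      (PySem.Chars.split₀.go l cur []).head? =
        some (cur.reverse ++ l.takeWhile (fun c => !PySem.Chars.isspace c)) := by
  intro l
  induction l with
  | nil =>
    intro cur hcur
    rw [PySem.Chars.split₀.go]
    simp [List.isEmpty_iff, hcur]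
  | cons c rest ih =>
    intro cur hcur
    rw [PySem.Chars.split₀.go]
    by_cases h : PySem.Chars.isspace c
    · simp only [h, if_true, List.isEmpty_iff, hcur, if_false]
      have := pv_split₀_go_head_acc rest [] [] cur.reverse
      simp only [List.nil_append] at this
      rw [this]
      simp [List.takeWhile, h]
    · simp only [h, Bool.false_eq_true, if_false]
      rw [ih (c :: cur) (by simp)]
      simp [List.takeWhile, h]

theorem pv_split₀_head (l : List Char) :
    (PySem.Chars.split₀ l).headD [] =
      (l.dropWhile PySem.Chars.isspace).takeWhile (fun c => !PySem.Chars.isspace c) := by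
  unfold PySem.Chars.split₀
  induction l with
  | nil => rfl
  | cons c rest ih =>
    rw [PySem.Chars.split₀.go]
    by_cases h : PySem.Chars.isspace c
    · simpa [List.dropWhile, h] using ih
    · simp only [h, Bool.false_eq_true, if_false, List.isEmpty_nil, if_true]
      rw [List.headD_eq_head?_getD, pv_split₀_go_head_mid rest [c] (by simp)]
      simp [List.dropWhile, h]

-- whitespace-suffix decomposition of rstrip
theorem pv_rstrip_decomp (l : List Char) :
    ∃ sp, l = PySem.Chars.rstrip l ++ sp ∧ ∀ c ∈ sp, PySem.Chars.isspace c = true := by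
  refine ⟨(l.reverse.takeWhile PySem.Chars.isspace).reverse, ?_, ?_⟩
  · unfold PySem.Chars.rstrip
    rw [← List.reverse_append, List.takeWhile_append_dropWhile, List.reverse_reverse]
  · intro c hc
    rw [List.mem_reverse] at hc
    exact List.mem_takeWhile_imp hc

theorem pv_takeWhile_not_append (x sp : List Char)
    (hsp : ∀ c ∈ sp, PySem.Chars.isspace c = true) :
    (x ++ sp).takeWhile (fun c => !PySem.Chars.isspace c) =
      x.takeWhile (fun c => !PySem.Chars.isspace c) := by
  induction x with
  | nil =>
    simp only [List.nil_append, List.takeWhile_nil]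
    cases sp with
    | nil => rfl
    | cons d sp' => simp [List.takeWhile, hsp d (by simp)]
  | cons c x' ih =>
    by_cases h : PySem.Chars.isspace c
    · simp [List.takeWhile, h]
    · simp [List.takeWhile, h, ih]

theorem pv_word_append_sp (x sp : List Char)
    (hsp : ∀ c ∈ sp, PySem.Chars.isspace c = true) :
    ((x ++ sp).dropWhile PySem.Chars.isspace).takeWhile (fun c => !PySem.Chars.isspace c) =
      (x.dropWhile PySem.Chars.isspace).takeWhile (fun c => !PySem.Chars.isspace c) := by
  induction x with
  | nil =>
    simp only [List.nil_append, List.dropWhile_nil, List.takeWhile_nil]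
    rw [List.dropWhile_eq_nil_iff.mpr hsp]
    rfl
  | cons c x' ih =>
    by_cases h : PySem.Chars.isspace c
    · simpa [List.dropWhile, h] using ih
    · simp only [List.cons_append, List.dropWhile_cons_of_neg h]
      simp [List.takeWhile, h, pv_takeWhile_not_append x' sp hsp]

theorem pv_word_rstrip (y : List Char) :
    ((PySem.Chars.rstrip y).dropWhile PySem.Chars.isspace).takeWhile (fun c => !PySem.Chars.isspace c) =
      (y.dropWhile PySem.Chars.isspace).takeWhile (fun c => !PySem.Chars.isspace c) := by
  obtain ⟨sp, hy, hsp⟩ := pv_rstrip_decomp y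
  conv_rhs => rw [hy]
  rw [pv_word_append_sp _ sp hsp]

-- dropWhile isspace commutes with takeWhile (· != ',')
theorem pv_drop_take_comm (l : List Char) :
    (l.takeWhile (fun x => x != ',')).dropWhile PySem.Chars.isspace =
      (l.dropWhile PySem.Chars.isspace).takeWhile (fun x => x != ',') := by
  induction l with
  | nil => rfl
  | cons c rest ih =>
    by_cases h : PySem.Chars.isspace c
    · have hc : (c != ',') = true := by
        rcases eq_or_ne c ',' with he | he
        · subst he; exact absurd h (by decide)
        · simp [he]
      simp [List.takeWhile, List.dropWhile, h, hc, ih]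
    · by_cases hc : (c != ',') = true
      · simp [List.takeWhile, List.dropWhile, h, hc]
      · simp only [Bool.not_eq_true] at hc
        simp [List.takeWhile, List.dropWhile, h, hc]

-- strip = [] means everything is whitespace
theorem pv_strip_nil (l : List Char) (h : PySem.Chars.strip l = []) :
    ∀ c ∈ l, PySem.Chars.isspace c = true := by
  unfold PySem.Chars.strip PySem.Chars.rstrip PySem.Chars.lstrip at h
  rw [List.reverse_eq_nil_iff, List.dropWhile_eq_nil_iff] at h
  intro c hc
  by_cases hs : PySem.Chars.isspace c
  · exact hs
  · exfalso
    have hmem : c ∈ l.dropWhile PySem.Chars.isspace := by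
      rcases (List.takeWhile_append_dropWhile (p := PySem.Chars.isspace) (l := l)) ▸ hc with h'
      rw [← List.takeWhile_append_dropWhile (p := PySem.Chars.isspace) (l := l), List.mem_append] at hc
      rcases hc with h1 | h1
      · exact absurd (List.mem_takeWhile_imp h1) (by simp [hs])
      · exact h1
    exact absurd (h c (by simpa using hmem)) (by simp [hs])

-- the separator-cut step of A is a takeWhile
theorem pv_cut_step (a : Char) (w : List Char) :
    (if PySem.Chars.isIn [a] w then (PySem.Chars.splitOn w [a]).headD [] else w) =
      w.takeWhile (fun x => x != a) := by
  by_cases h : PySem.Chars.isIn [a] w = true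
  · simp only [h, if_true]
    exact pv_splitOn_head a w
  · simp only [h, Bool.false_eq_true, if_false]
    have hnot : a ∉ w := by
      intro hmem
      exact absurd ((PySem.Chars.isIn_iff_infix [a] w).mpr ((List.singleton_infix_iff a w).mpr hmem)) h
    exact (List.takeWhile_eq_self_iff.mpr (by
      intro x hx
      simp only [bne_iff_ne, ne_eq]
      exact fun he => hnot (he ▸ hx))).symm

-- main list-level equality
theorem pv_main (cs : List Char) :
    ((((PySem.Chars.upper (PySem.Chars.strip (cs.takeWhile (fun x => x != ',')))).dropWhile
          PySem.Chars.isspace).takeWhile (fun c => !PySem.Chars.isspace c)).takeWhile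
        (fun x => x != '+')).takeWhile (fun x => x != '/') =
      ((cs.dropWhile PySem.Chars.isspace).takeWhile pvNS).map PySem.Chars.upperChar := by
  -- move the map upperChar outward through dropWhile/takeWhile
  have hS : (PySem.Chars.isspace ∘ PySem.Chars.upperChar) = PySem.Chars.isspace :=
    funext fun c => pv_isspace_upperChar c
  have hNS : ((fun c => !PySem.Chars.isspace c) ∘ PySem.Chars.upperChar) =
      (fun c => !PySem.Chars.isspace c) := funext fun c => by simp [Function.comp, pv_isspace_upperChar c]
  have hP : ((fun x => x != '+') ∘ PySem.Chars.upperChar) = (fun x => x != '+') :=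
    funext fun c => by simp only [Function.comp, bne]; rw [pv_beq_upperChar c '+' (by decide)]
  have hsl : ((fun x => x != '/') ∘ PySem.Chars.upperChar) = (fun x => x != '/') :=
    funext fun c => by simp only [Function.comp, bne]; rw [pv_beq_upperChar c '/' (by decide)]
  unfold PySem.Chars.upper
  rw [List.dropWhile_map, hS, List.takeWhile_map, hNS, List.takeWhile_map, hP,
    List.takeWhile_map, hsl]
  -- now both sides are map upperChar of takeWhile chains; reduce the A-side chain
  unfold PySem.Chars.strip PySem.Chars.lstrip
  rw [pv_word_rstrip, List.dropWhile_idempotent, pv_drop_take_comm]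
  congr 1
  rw [List.takeWhile_takeWhile, List.takeWhile_takeWhile, List.takeWhile_takeWhile]
  congr 1
  funext c
  unfold pvNS
  cases h1 : (c == ',') <;> cases h2 : (c == '+') <;> cases h3 : (c == '/')
    <;> cases h4 : PySem.Chars.isspace c <;> simp [bne, h1, h2, h3]

-- ===== VERDICT (by name: the statement is the Claim_ definition above) =====
theorem extract_product_type_spec : Claim_equal_extract_product_type := by
  intro desc _
  unfold Spec_extract_product_type extract_product_type extract_product_type_alt
  rw [pvSkipWs_eq, pvTakeWord_eq]
  by_cases hg : PySem.Chars.strip desc.toList = []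
  · simp only [hg, if_true]
    have hall := pv_strip_nil desc.toList hg
    rw [List.dropWhile_eq_nil_iff.mpr hall]
    rfl
  · simp only [hg, if_false]
    congr 1
    rw [pv_splitOn_head]
    have hfw : ∀ fp : List Char,
        (if fp.isEmpty then ([] : List Char) else (PySem.Chars.split₀ fp).headD []) =
          (fp.dropWhile PySem.Chars.isspace).takeWhile (fun c => !PySem.Chars.isspace c) := by
      intro fp
      by_cases he : fp.isEmpty
      · rw [List.isEmpty_iff] at he
        simp [he]
      · simp only [he, Bool.false_eq_true, if_false]
        exact pv_split₀_head fp
    rw [hfw]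
    rw [List.foldl_cons, List.foldl_cons, List.foldl_nil, pv_cut_step, pv_cut_step]
    exact pv_main desc.toList
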